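-- pv_equiv track=rewrite | github.com/rootdiae/rootdiae_python_scripts | Transaction sender/bn_proxy_address.py | check_transfer_conditions
-- ===== SOURCE A (Python) =====
-- from typing import List, Dict, Optional, Generator
--
-- TRANSFER_TOPIC0 = "0xddf252ad1be2c89b69c2b068fc378daa952ba7f163c4a11628f55a4df523b3ef"
--
-- FROM_TARGET_WALLET = "0x0000000000000000000000006aba0315493b7e6989041C91181337b662fB1b90".lower() # BN 2.0 ALPHA地址
--
-- TO_TARGET_WALLET = "0x0000000000000000000000006aba0315493b7e6989041C91181337b662fB1b90".lower()
--
-- def check_transfer_conditions(logs: List[Dict]) -> bool: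
--     """检查交易日志是否包含符合条件的transfer事件"""
--     transfer_logs = [log for log in logs if log.get("topics", [])[0] == TRANSFER_TOPIC0]
--
--     has_topic1_match = any(
--         len(log.get("topics", [])) >= 3 and log["topics"][1] == FROM_TARGET_WALLET
--         for log in transfer_logs
--     )
--
--     has_topic2_match = any(
--         len(log.get("topics", [])) >= 3 and log["topics"][2] == TO_TARGET_WALLET
--         for log in transfer_logs
--     )
--
--     return has_topic1_match and has_topic2_match
-- ===== SOURCE B (Python) =====
-- from typing import List, Dict
--
-- TRANSFER_TOPIC0 = "0xddf252ad1be2c89b69c2b068fc378daa952ba7f163c4a11628f55a4df523b3ef"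
-- FROM_TARGET_WALLET = "0x0000000000000000000000006aba0315493b7e6989041C91181337b662fB1b90".lower()
-- TO_TARGET_WALLET = "0x0000000000000000000000006aba0315493b7e6989041C91181337b662fB1b90".lower()
--
-- def check_transfer_conditions(logs: List[Dict]) -> bool:
--     # single short-circuiting pass over an integer bitmask: bit0 = from-match seen,
--     # bit1 = to-match seen; returns as soon as mask == 3 (A always scans everything)
--     mask = 0
--     for log in logs:
--         topics = log.get("topics", [])
--         if topics[0] == TRANSFER_TOPIC0 and len(topics) >= 3:
--             mask |= (topics[1] == FROM_TARGET_WALLET) | ((topics[2] == TO_TARGET_WALLET) << 1)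
--             if mask == 3:
--                 return True
--     return mask == 3
-- ===== Notes on version B (the rewrite author's own statement) =====
-- stated objective: alternative
-- what changed: replaces A's three full passes (filter building transfer_logs plus two any() scans) with one short-circuiting pass folding each log into a 2-bit integer mask and returning early the moment both bits are set
import Mathlib
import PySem

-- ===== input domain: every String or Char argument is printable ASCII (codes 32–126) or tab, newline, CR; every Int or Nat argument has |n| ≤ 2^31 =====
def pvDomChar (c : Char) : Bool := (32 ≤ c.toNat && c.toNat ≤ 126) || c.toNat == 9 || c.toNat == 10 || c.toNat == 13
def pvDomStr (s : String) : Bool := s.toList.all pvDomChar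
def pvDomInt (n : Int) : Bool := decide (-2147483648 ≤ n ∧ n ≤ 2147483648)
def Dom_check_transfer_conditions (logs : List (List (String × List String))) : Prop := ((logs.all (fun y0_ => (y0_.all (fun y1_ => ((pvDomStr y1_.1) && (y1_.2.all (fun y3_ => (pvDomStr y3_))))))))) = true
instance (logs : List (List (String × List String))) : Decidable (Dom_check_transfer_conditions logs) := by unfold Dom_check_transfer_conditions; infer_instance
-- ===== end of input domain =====

-- B replaces A's three full passes (filter + two any() scans) with one short-circuiting
-- pass over a 2-bit integer mask that returns early once both matches are seen.

def TRANSFER_TOPIC0 : String := "0xddf252ad1be2c89b69c2b068fc378daa952ba7f163c4a11628f55a4df523b3ef"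
def FROM_TARGET_WALLET : String := PySem.Str.lower "0x0000000000000000000000006aba0315493b7e6989041C91181337b662fB1b90"
def TO_TARGET_WALLET : String := PySem.Str.lower "0x0000000000000000000000006aba0315493b7e6989041C91181337b662fB1b90"

-- log.get("topics", []) (dict = assoc list, first-match lookup)
def getTopics (log : List (String × List String)) : List String :=
  PySem.Dict.getD (PySem.Dict.mk log) "topics" []

-- ===== PORT A =====
-- the filter predicate: log.get("topics", [])[0] == TRANSFER_TOPIC0 (index 0 in range under Pre_)
def ctcIsTransfer (log : List (String × List String)) : Bool :=
  PySem.List.pyGet? (getTopics log) 0 == some TRANSFER_TOPIC0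
-- len(topics) >= 3 and topics[1] == FROM_TARGET_WALLET  (index 1 in range under the length guard)
def ctcTopic1 (log : List (String × List String)) : Bool :=
  decide (3 ≤ (getTopics log).length) && ((getTopics log).getD 1 "" == FROM_TARGET_WALLET)
-- len(topics) >= 3 and topics[2] == TO_TARGET_WALLET
def ctcTopic2 (log : List (String × List String)) : Bool :=
  decide (3 ≤ (getTopics log).length) && ((getTopics log).getD 2 "" == TO_TARGET_WALLET)

def check_transfer_conditions (logs : List (List (String × List String))) : Bool :=
  let transfer_logs := logs.filter ctcIsTransfer
  let has_topic1_match := transfer_logs.any ctcTopic1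
  let has_topic2_match := transfer_logs.any ctcTopic2
  has_topic1_match && has_topic2_match

-- ===== PORT B =====
-- B's loop: fold the remaining logs into the bitmask, returning early when mask == 3
def ctcScan : List (List (String × List String)) → Nat → Bool
  | [], mask => mask == 3
  | l :: ls, mask =>
    let topics := getTopics l
    if (PySem.List.pyGet? topics 0 == some TRANSFER_TOPIC0) && decide (3 ≤ topics.length) then
      let mask' := mask ||| (cond (topics.getD 1 "" == FROM_TARGET_WALLET) 1 0)
                        ||| (cond (topics.getD 2 "" == TO_TARGET_WALLET) 2 0)
      if mask' == 3 then true else ctcScan ls mask'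
    else ctcScan ls mask

def check_transfer_conditions_alt (logs : List (List (String × List String))) : Bool :=
  ctcScan logs 0

-- ===== PRECONDITION & SPEC =====
-- Pre_ excludes logs whose "topics" entry is missing or empty: there A raises IndexError on topics[0].
def Pre_check_transfer_conditions (logs : List (List (String × List String))) : Prop :=
  ∀ log ∈ logs, PySem.Dict.getD (PySem.Dict.mk log) "topics" [] ≠ []
instance (logs : List (List (String × List String))) : Decidable (Pre_check_transfer_conditions logs) := by
  unfold Pre_check_transfer_conditions; infer_instance

def pvWitness_check_transfer_conditions : (List (List (String × List String))) :=
  [[("topics", ["0xddf252ad1be2c89b69c2b068fc378daa952ba7f163c4a11628f55a4df523b3ef",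
                "0x0000000000000000000000006aba0315493b7e6989041c91181337b662fb1b90",
                "0x0000000000000000000000006aba0315493b7e6989041c91181337b662fb1b90"])],
   [("topics", ["0xabc"])]]

def Spec_check_transfer_conditions (logs : List (List (String × List String))) (out : Bool) : Prop := out = check_transfer_conditions_alt logs
instance (logs : List (List (String × List String))) (out : Bool) : Decidable (Spec_check_transfer_conditions logs out) := by unfold Spec_check_transfer_conditions; infer_instance

-- ===== CLAIM (what is proved, stated in full; the proofs are below) =====
def Claim_equal_check_transfer_conditions : Prop := ∀ (logs : List (List (String × List String))), Dom_check_transfer_conditions logs → Pre_check_transfer_conditions logs → Spec_check_transfer_conditions logs (check_transfer_conditions logs)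

-- ===== LEMMAS AND PROOFS =====

-- the mask encoding: bit0 = saw a from-match, bit1 = saw a to-match
def ctcMaskOf (f t : Bool) : Nat := (cond f 1 0) ||| (cond t 2 0)

lemma ctcMaskOf_or (f t b1 b2 : Bool) :
    ctcMaskOf f t ||| cond b1 1 0 ||| cond b2 2 0 = ctcMaskOf (f || b1) (t || b2) := by
  cases f <;> cases t <;> cases b1 <;> cases b2 <;> decide

lemma ctcMaskOf_eq3 (f t : Bool) : (ctcMaskOf f t == 3) = (f && t) := by
  cases f <;> cases t <;> decide

-- B's scan, started at any mask, computes exactly A's two any-over-filter results OR'd in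
lemma ctc_scan_spec (logs : List (List (String × List String))) : ∀ (f t : Bool),
    ctcScan logs (ctcMaskOf f t) =
      ((f || (logs.filter ctcIsTransfer).any ctcTopic1) &&
       (t || (logs.filter ctcIsTransfer).any ctcTopic2)) := by
  induction logs with
  | nil => intro f t; simp [ctcScan, ctcMaskOf_eq3]
  | cons l ls ih =>
    intro f t
    simp only [ctcScan, List.filter_cons]
    by_cases h0 : ctcIsTransfer l
    · by_cases h3 : 3 ≤ (getTopics l).length
      · have hg : ((PySem.List.pyGet? (getTopics l) 0 == some TRANSFER_TOPIC0) &&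
            decide (3 ≤ (getTopics l).length)) = true := by
          simp [ctcIsTransfer] at h0; simp [h0, h3]
        rw [if_pos hg, ctcMaskOf_or, ctcMaskOf_eq3]
        by_cases hdone : ((f || ((getTopics l).getD 1 "" == FROM_TARGET_WALLET)) &&
            (t || ((getTopics l).getD 2 "" == TO_TARGET_WALLET))) = true
        · rw [if_pos (by simpa using hdone)]
          simp only [Bool.and_eq_true, Bool.or_eq_true] at hdone
          simp [h0, ctcTopic1, ctcTopic2, h3, List.any_cons]
          rcases hdone with ⟨h1, h2⟩
          constructor
          · rcases h1 with h | h
            · exact Or.inl h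
            · exact Or.inr (Or.inl (by simpa using h))
          · rcases h2 with h | h
            · exact Or.inl h
            · exact Or.inr (Or.inl (by simpa using h))
        · rw [if_neg (by simpa using hdone), ih]
          simp [h0, ctcTopic1, ctcTopic2, h3, List.any_cons, Bool.or_assoc]
      · have hg : ((PySem.List.pyGet? (getTopics l) 0 == some TRANSFER_TOPIC0) &&
            decide (3 ≤ (getTopics l).length)) = false := by simp [h3]
        rw [if_neg (by simp [hg]), ih]
        simp [h0, ctcTopic1, ctcTopic2, h3, List.any_cons]
    · have hg : ((PySem.List.pyGet? (getTopics l) 0 == some TRANSFER_TOPIC0) &&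
          decide (3 ≤ (getTopics l).length)) = false := by
        simp [ctcIsTransfer] at h0; simp [h0]
      rw [if_neg (by simp [hg]), ih]
      simp [h0]

-- ===== VERDICT (by name: the statement is the Claim_ definition above) =====
theorem check_transfer_conditions_spec : Claim_equal_check_transfer_conditions := by
  intro logs _ _
  unfold Spec_check_transfer_conditions check_transfer_conditions check_transfer_conditions_alt
  have := ctc_scan_spec logs false false
  simpa [ctcMaskOf] using this.symm
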